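-- pv_equiv track=rewrite | github.com/iqbalmirzayev/tutor-ai-exam | app.py | sort_boxes_column_wise
-- ===== SOURCE A (Python) =====
-- def sort_boxes_column_wise(boxes, x_threshold=50):
--     if not boxes: return []
--     boxes_sorted_x = sorted(boxes, key=lambda b: b[0])
--     columns = []
--     current_col = [boxes_sorted_x[0]]
--     for i in range(1, len(boxes_sorted_x)):
--         box = boxes_sorted_x[i]
--         prev_box = boxes_sorted_x[i-1]
--         if (box[0] - prev_box[0]) > x_threshold:
--             columns.append(current_col)
--             current_col = []
--         current_col.append(box)
--     columns.append(current_col)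
--     final_sorted = []
--     for col in columns:
--         col.sort(key=lambda b: b[1])
--         final_sorted.extend(col)
--     return final_sorted
-- ===== SOURCE B (Python) =====
-- def sort_boxes_column_wise(boxes, x_threshold=50):
--     if not boxes:
--         return []
--     bs = sorted(boxes, key=lambda b: b[0])
--     tagged = [(0, bs[0])]
--     c = 0
--     for prev, b in zip(bs, bs[1:]):
--         if b[0] - prev[0] > x_threshold:
--             c += 1
--         tagged.append((c, b))
--     buckets = {}
--     for k, b in sorted(tagged, key=lambda t: t[1][1]):
--         buckets[k] = buckets.get(k, []) + [b]
--     out = []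
--     for k in range(c + 1):
--         out.extend(buckets.get(k, []))
--     return out
-- ===== Notes on version B (the rewrite author's own statement) =====
-- stated objective: alternative
-- what changed: A sorts each materialised column separately in a second loop; B instead performs ONE global stable sort of the column-tagged boxes by y and then distributes them into per-column buckets in a single linear pass (pigeonhole distribution), concatenating the buckets in column order - no per-column sort calls at all.
import Mathlib
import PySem

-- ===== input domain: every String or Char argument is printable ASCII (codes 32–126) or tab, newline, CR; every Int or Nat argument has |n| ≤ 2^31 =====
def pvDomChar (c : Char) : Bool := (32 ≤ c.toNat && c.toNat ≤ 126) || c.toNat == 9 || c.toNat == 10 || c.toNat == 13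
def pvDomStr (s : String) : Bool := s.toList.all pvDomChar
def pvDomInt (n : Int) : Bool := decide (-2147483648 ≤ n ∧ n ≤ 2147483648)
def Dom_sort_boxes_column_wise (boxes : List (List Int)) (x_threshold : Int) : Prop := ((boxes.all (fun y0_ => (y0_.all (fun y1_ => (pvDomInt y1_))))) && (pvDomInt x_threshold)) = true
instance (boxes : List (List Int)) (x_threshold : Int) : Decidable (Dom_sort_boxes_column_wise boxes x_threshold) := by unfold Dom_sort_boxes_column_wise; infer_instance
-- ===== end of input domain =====

-- B replaces A's per-column sorting loop by ONE global stable y-sort of the column-tagged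
-- boxes followed by a linear bucket-distribution pass; proved to return the same list on
-- every input where A raises no exception (every box has at least 2 entries).

-- the Python lambdas `b[0]` and `b[1]`; inside Pre_ the indices are in range, so the
-- pyGetD default is never used
def keyX (b : List Int) : Int := PySem.List.pyGetD b 0 0
def keyY (b : List Int) : Int := PySem.List.pyGetD b 1 0

-- ===== PORT A =====
def sort_boxes_column_wise (boxes : List (List Int)) (x_threshold : Int) : List (List Int) :=
  if boxes = [] then []
  else
    let bs := PySem.List.sorted boxes keyX false
    match bs with
    | [] => []  -- unreachable: bs is a permutation of the nonempty boxes
    | b0 :: rest =>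
      -- `for i in range(1, len(bs)): box = bs[i]; prev_box = bs[i-1]` = a fold over
      -- the adjacent pairs (box, prev_box); state = (columns, current_col)
      let st := (rest.zip bs).foldl
        (fun (s : List (List (List Int)) × List (List Int)) (p : List Int × List Int) =>
          if keyX p.1 - keyX p.2 > x_threshold then (s.1 ++ [s.2], [] ++ [p.1])
          else (s.1, s.2 ++ [p.1]))
        ([], [b0])
      let columns := st.1 ++ [st.2]
      -- for col in columns: col.sort(key=λ b: b[1]); final_sorted.extend(col)
      columns.foldl (fun acc col => acc ++ PySem.List.sorted col keyY false) []

-- ===== PORT B =====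
def sort_boxes_column_wise_alt (boxes : List (List Int)) (x_threshold : Int) : List (List Int) :=
  if boxes = [] then []
  else
    let bs := PySem.List.sorted boxes keyX false
    match bs with
    | [] => []  -- unreachable
    | b0 :: rest =>
      -- `for prev, b in zip(bs, bs[1:])`; state = (tagged, c)
      let st := (bs.zip rest).foldl
        (fun (s : List (Int × List Int) × Int) (p : List Int × List Int) =>
          let c := if keyX p.2 - keyX p.1 > x_threshold then s.2 + 1 else s.2
          (s.1 ++ [(c, p.2)], c))
        ([(0, b0)], 0)
      -- for k, b in sorted(tagged, key=λ t: t[1][1]): buckets[k] = buckets.get(k, []) + [b]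
      let buckets := (PySem.List.sorted st.1 (fun t => keyY t.2) false).foldl
        (fun d (t : Int × List Int) => d.modify t.1 [] (· ++ [t.2])) PySem.Dict.empty
      -- for k in range(c + 1): out.extend(buckets.get(k, []))
      (PySem.List.pyRange 0 (st.2 + 1) 1).foldl (fun acc k => acc ++ buckets.getD k []) []

-- ===== PRECONDITION & SPEC =====
-- exactly where Python A returns normally: each box must have indices 0 and 1 (else IndexError)
def Pre_sort_boxes_column_wise (boxes : List (List Int)) (x_threshold : Int) : Prop :=
  ∀ b ∈ boxes, 2 ≤ b.length
instance (boxes : List (List Int)) (x_threshold : Int) : Decidable (Pre_sort_boxes_column_wise boxes x_threshold) := by unfold Pre_sort_boxes_column_wise; infer_instance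

def pvWitness_sort_boxes_column_wise : List (List Int) × Int := ([[0, 1], [100, 2], [3, 0]], 50)

def Spec_sort_boxes_column_wise (boxes : List (List Int)) (x_threshold : Int) (out : List (List Int)) : Prop := out = sort_boxes_column_wise_alt boxes x_threshold
instance (boxes : List (List Int)) (x_threshold : Int) (out : List (List Int)) : Decidable (Spec_sort_boxes_column_wise boxes x_threshold out) := by unfold Spec_sort_boxes_column_wise; infer_instance

-- ===== CLAIM (what is proved, stated in full; the proofs are below) =====
def Claim_equal_sort_boxes_column_wise : Prop := ∀ (boxes : List (List Int)) (x_threshold : Int), Dom_sort_boxes_column_wise boxes x_threshold → Pre_sort_boxes_column_wise boxes x_threshold → Spec_sort_boxes_column_wise boxes x_threshold (sort_boxes_column_wise boxes x_threshold)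

-- ===== LEMMAS AND PROOFS =====

-- the common intermediate: the columns A carves out of the x-sorted list
def colsFrom (th : Int) (prev : List Int) (cur : List (List Int)) : List (List Int) → List (List (List Int))
  | [] => [cur]
  | b :: rest => if keyX b - keyX prev > th then cur :: colsFrom th b [b] rest
                 else colsFrom th b (cur ++ [b]) rest

-- B's tagged list, described as the chunks of colsFrom tagged with consecutive indices
def tagChunks (c : Int) : List (List (List Int)) → List (Int × List Int)
  | [] => []
  | g :: gs => g.map (fun b => (c, b)) ++ tagChunks (c + 1) gs

-- A's column-building fold computes colsFrom
theorem A_fold_eq (th : Int) (rest : List (List Int)) :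
    ∀ (prev : List Int) (cols : List (List (List Int))) (cur : List (List Int)),
      (let st := (rest.zip (prev :: rest)).foldl
        (fun (s : List (List (List Int)) × List (List Int)) (p : List Int × List Int) =>
          if keyX p.1 - keyX p.2 > th then (s.1 ++ [s.2], [] ++ [p.1])
          else (s.1, s.2 ++ [p.1]))
        (cols, cur)
       st.1 ++ [st.2]) = cols ++ colsFrom th prev cur rest := by
  induction rest with
  | nil => intro prev cols cur; simp [colsFrom]
  | cons b rest ih =>
    intro prev cols cur
    simp only [List.zip_cons_cons, List.foldl_cons, colsFrom]
    by_cases h : keyX b - keyX prev > th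
    · rw [if_pos h, if_pos h, ih b (cols ++ [cur]) ([] ++ [b])]
      simp
    · rw [if_neg h, if_neg h]
      exact ih b cols (cur ++ [b])

-- B's tagging fold, as a recursion carrying the previous box; and its final counter
def tagFrom (th : Int) (c : Int) (prev : List Int) : List (List Int) → List (Int × List Int)
  | [] => []
  | b :: rest => let c' := if keyX b - keyX prev > th then c + 1 else c
                 (c', b) :: tagFrom th c' b rest

def nInc (th : Int) (prev : List Int) : List (List Int) → Int
  | [] => 0
  | b :: rest => (if keyX b - keyX prev > th then 1 else 0) + nInc th b rest

theorem B_fold_eq (th : Int) (rest : List (List Int)) :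
    ∀ (prev : List Int) (acc : List (Int × List Int)) (c : Int),
      (((prev :: rest).zip rest).foldl
        (fun (s : List (Int × List Int) × Int) (p : List Int × List Int) =>
          let c := if keyX p.2 - keyX p.1 > th then s.2 + 1 else s.2
          (s.1 ++ [(c, p.2)], c))
        (acc, c)) = (acc ++ tagFrom th c prev rest, c + nInc th prev rest) := by
  induction rest with
  | nil => intro prev acc c; simp [tagFrom, nInc]
  | cons b rest ih =>
    intro prev acc c
    simp only [List.zip_cons_cons, List.foldl_cons, tagFrom, nInc]
    by_cases h : keyX b - keyX prev > th
    · rw [if_pos h, if_pos h, ih b (acc ++ [(c + 1, b)]) (c + 1)]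
      simp
      omega
    · rw [if_neg h, if_neg h, ih b (acc ++ [(c, b)]) c]
      simp

-- the number of columns is 1 + the number of counter increments
theorem colsFrom_length (th : Int) (rest : List (List Int)) :
    ∀ (prev : List Int) (cur : List (List Int)),
      ((colsFrom th prev cur rest).length : Int) = 1 + nInc th prev rest := by
  induction rest with
  | nil => intro prev cur; simp [colsFrom, nInc]
  | cons b rest ih =>
    intro prev cur
    simp only [colsFrom, nInc]
    by_cases h : keyX b - keyX prev > th
    · rw [if_pos h, if_pos h]
      simp only [List.length_cons]
      push_cast
      rw [ih b [b]]
      ring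
    · rw [if_neg h, if_neg h, ih b (cur ++ [b])]
      simp

-- the two descriptions of the grouping agree
theorem tagChunks_colsFrom (th : Int) (rest : List (List Int)) :
    ∀ (prev : List Int) (c : Int) (cur : List (List Int)),
      tagChunks c (colsFrom th prev cur rest)
        = cur.map (fun b => (c, b)) ++ tagFrom th c prev rest := by
  induction rest with
  | nil => intro prev c cur; simp [colsFrom, tagChunks, tagFrom]
  | cons b rest ih =>
    intro prev c cur
    simp only [colsFrom, tagFrom]
    by_cases h : keyX b - keyX prev > th
    · rw [if_pos h]
      simp only [if_pos h, tagChunks, ih b (c + 1) [b]]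
      simp
    · rw [if_neg h]
      simp only [if_neg h]
      rw [ih b c (cur ++ [b])]
      simp

-- every tag produced from start index c is ≥ c
theorem tagChunks_tag_ge (gs : List (List (List Int))) :
    ∀ (c : Int), ∀ t ∈ tagChunks c gs, c ≤ t.1 := by
  induction gs with
  | nil => intro c t ht; simp [tagChunks] at ht
  | cons g gs ih =>
    intro c t ht
    simp only [tagChunks, List.mem_append, List.mem_map] at ht
    rcases ht with ⟨b, _, rfl⟩ | ht
    · exact le_refl c
    · have := ih (c + 1) t ht; omega

-- FILTER COMMUTES WITH THE STABLE SORT: one insertion into a nondecreasing list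
theorem filter_insertBy {α : Type} (key : α → Int) (p : α → Bool) (x : α) (s : List α)
    (hs : s.Pairwise (fun a b => key a ≤ key b)) :
    (PySem.List.insertBy (fun a b => decide (key a < key b)) x s).filter p
      = if p x then PySem.List.insertBy (fun a b => decide (key a < key b)) x (s.filter p)
        else s.filter p := by
  induction s with
  | nil => by_cases hx : p x <;> simp [PySem.List.insertBy, hx]
  | cons y s ih =>
    rcases List.pairwise_cons.mp hs with ⟨hy, hs'⟩
    simp only [PySem.List.insertBy]
    by_cases h : key x < key y
    · rw [if_pos (by simpa using h)]
      by_cases hx : p x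
      · rw [if_pos hx]
        -- every kept element of y :: s has key ≥ key y > key x, so x is inserted in front
        have hfront : ∀ z ∈ (y :: s).filter p, key x < key z := by
          intro z hz
          have hz' := List.mem_of_mem_filter hz
          rcases List.mem_cons.mp hz' with rfl | hz''
          · exact h
          · exact lt_of_lt_of_le h (hy z hz'')
        have hins : PySem.List.insertBy (fun a b => decide (key a < key b)) x
            ((y :: s).filter p) = x :: (y :: s).filter p := by
          cases hflt : (y :: s).filter p with
          | nil => simp [PySem.List.insertBy]
          | cons z zs =>
            have hz : key x < key z := hfront z (by rw [hflt]; exact List.mem_cons_self)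
            simp [PySem.List.insertBy, hz]
        rw [hins, List.filter_cons, if_pos hx]
      · rw [if_neg hx]
        simp [List.filter_cons, hx]
    · rw [if_neg (by simpa using h)]
      rw [List.filter_cons]
      by_cases hyp : p y
      · rw [if_pos hyp, List.filter_cons, if_pos hyp, ih hs']
        by_cases hx : p x
        · rw [if_pos hx, if_pos hx]
          simp only [PySem.List.insertBy, if_neg (by simpa using h : ¬ (decide (key x < key y) = true))]
        · rw [if_neg hx, if_neg hx]
      · rw [if_neg hyp, List.filter_cons, if_neg hyp, ih hs']

-- filtering a stable sort = sorting the filtered list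
theorem filter_sorted {α : Type} (key : α → Int) (p : α → Bool) (l : List α) :
    (PySem.List.sorted l key false).filter p = PySem.List.sorted (l.filter p) key false := by
  induction l using List.reverseRecOn with
  | nil => simp
  | append_singleton l x ih =>
    rw [PySem.List.sorted_eq_foldl_insertBy, List.foldl_append, List.foldl_cons, List.foldl_nil,
        ← PySem.List.sorted_eq_foldl_insertBy]
    rw [filter_insertBy key p x _ (PySem.List.sorted_pairwise l key)]
    rw [ih, List.filter_append, List.filter_cons, List.filter_nil]
    by_cases hx : p x
    · rw [if_pos hx]
      simp only [hx, if_pos]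
      rw [PySem.List.sorted_eq_foldl_insertBy (xs := l.filter p ++ [x]), List.foldl_append,
          List.foldl_cons, List.foldl_nil, ← PySem.List.sorted_eq_foldl_insertBy]
    · rw [if_neg hx]; simp [hx]

-- one insertion commutes with tagging every element with the same first component
theorem insertBy_map_tag (c : Int) (x : List Int) (acc : List (List Int)) :
    PySem.List.insertBy (fun a b : Int × List Int => decide (keyY a.2 < keyY b.2)) (c, x)
        (acc.map (fun b => (c, b)))
    = (PySem.List.insertBy (fun a b => decide (keyY a < keyY b)) x acc).map (fun b => (c, b)) := by
  induction acc with
  | nil => simp [PySem.List.insertBy]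
  | cons y acc ih =>
    simp only [List.map_cons, PySem.List.insertBy]
    by_cases h : keyY x < keyY y
    · simp [h]
    · simp [h, ih]

-- sorting a constant-tag block by y is sorting the block by y, tagged
theorem sorted_map_tag (c : Int) (g : List (List Int)) :
    PySem.List.sorted (g.map (fun b => (c, b))) (fun t => keyY t.2) false
      = (PySem.List.sorted g keyY false).map (fun b => (c, b)) := by
  rw [PySem.List.sorted_eq_foldl_insertBy, PySem.List.sorted_eq_foldl_insertBy]
  induction g using List.reverseRecOn with
  | nil => simp
  | append_singleton g x ih =>
    simp only [List.map_append, List.map_cons, List.map_nil, List.foldl_append,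
      List.foldl_cons, List.foldl_nil]
    rw [ih, insertBy_map_tag]

-- MAIN: walking the column indices and collecting each bucket of the y-sorted tagged
-- list = per-chunk y-sorts, concatenated
theorem buckets_eq (gs : List (List (List Int))) :
    ∀ (c0 : Int),
      (PySem.List.pyRange c0 (c0 + (gs.length : Int)) 1).flatMap
        (fun k => ((PySem.List.sorted ((tagChunks c0 gs).filter (fun t => t.1 == k))
            (fun t => keyY t.2) false).map (fun t => t.2)))
      = gs.flatMap (fun g => PySem.List.sorted g keyY false) := by
  induction gs with
  | nil =>
    intro c0
    have : PySem.List.pyRange c0 (c0 + (0 : Int)) 1 = [] := by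
      simp [PySem.List.pyRange]
    rw [show (c0 + (([] : List (List (List Int))).length : Int)) = c0 + 0 by simp, this]
    simp
  | cons g gs ih =>
    intro c0
    have hcons : PySem.List.pyRange c0 (c0 + ((g :: gs).length : Int)) 1
        = c0 :: PySem.List.pyRange (c0 + 1) (c0 + ((g :: gs).length : Int)) 1 := by
      apply PySem.List.pyRange_one_cons
      simp only [List.length_cons]
      push_cast
      omega
    have hstop : c0 + ((g :: gs).length : Int) = (c0 + 1) + (gs.length : Int) := by
      simp only [List.length_cons]; push_cast; ring
    rw [hcons, List.flatMap_cons]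
    -- head bucket: exactly the first chunk
    have hhead : (tagChunks c0 (g :: gs)).filter (fun t => t.1 == c0)
        = g.map (fun b => (c0, b)) := by
      simp only [tagChunks, List.filter_append]
      have h1 : (g.map (fun b => (c0, b))).filter (fun t => t.1 == c0)
          = g.map (fun b => (c0, b)) := by
        apply List.filter_eq_self.mpr
        intro t ht
        rcases List.mem_map.mp ht with ⟨b, _, rfl⟩
        simp
      have h2 : (tagChunks (c0 + 1) gs).filter (fun t => t.1 == c0) = [] := by
        apply List.filter_eq_nil_iff.mpr
        intro t ht
        have := tagChunks_tag_ge gs (c0 + 1) t ht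
        simp only [beq_iff_eq]
        omega
      rw [h1, h2, List.append_nil]
    -- tail buckets ignore the first chunk
    have htail : ∀ k ∈ PySem.List.pyRange (c0 + 1) (c0 + ((g :: gs).length : Int)) 1,
        (tagChunks c0 (g :: gs)).filter (fun t => t.1 == k)
          = (tagChunks (c0 + 1) gs).filter (fun t => t.1 == k) := by
      intro k hk
      have hk1 : c0 + 1 ≤ k := (PySem.List.mem_pyRange_one.mp hk).1
      simp only [tagChunks, List.filter_append]
      have h1 : (g.map (fun b => (c0, b))).filter (fun t => t.1 == k) = [] := by
        apply List.filter_eq_nil_iff.mpr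
        intro t ht
        rcases List.mem_map.mp ht with ⟨b, _, rfl⟩
        simp only [beq_iff_eq]
        omega
      rw [h1, List.nil_append]
    rw [List.flatMap_congr (fun k hk => by rw [htail k hk])]
    rw [hstop] at *
    rw [ih (c0 + 1), hhead, sorted_map_tag, List.map_map, List.flatMap_cons]
    simp

-- ===== VERDICT (by name: the statement is the Claim_ definition above) =====
theorem sort_boxes_column_wise_spec : Claim_equal_sort_boxes_column_wise := by
  intro boxes th _ _
  unfold Spec_sort_boxes_column_wise
  unfold sort_boxes_column_wise sort_boxes_column_wise_alt
  by_cases hb : boxes = []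
  · simp [hb]
  · rw [if_neg hb, if_neg hb]
    rcases hbs : PySem.List.sorted boxes keyX false with _ | ⟨b0, rest⟩
    · rfl
    · simp only
      rw [A_fold_eq th rest b0 [] [b0]]
      rw [B_fold_eq th rest b0 [(0, b0)] 0]
      simp only [List.nil_append, List.singleton_append, zero_add]
      set gs := colsFrom th b0 [b0] rest with hgs
      have hkeyed : (0, b0) :: tagFrom th 0 b0 rest = tagChunks 0 gs := by
        rw [hgs, tagChunks_colsFrom th rest b0 0 [b0]]; simp
      rw [hkeyed]
      rw [PySem.List.foldl_append_eq_flatMap (g := fun col => PySem.List.sorted col keyY false)]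
      rw [PySem.List.foldl_append_eq_flatMap]
      have hlen : nInc th b0 rest + 1 = (0 : Int) + (gs.length : Int) := by
        rw [hgs, colsFrom_length th rest b0 [b0]]; ring
      rw [hlen]
      rw [← buckets_eq gs 0]
      simp only [List.nil_append]
      apply List.flatMap_congr
      intro k _
      rw [PySem.Dict.getD_foldl_modify_append]
      rw [PySem.Dict.getD_empty, List.nil_append]
      rw [filter_sorted]
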